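-- pv_equiv track=rewrite | github.com/woowenjun99/leetcode | src/Count Odd Letters from Number/main.py | countOddLetters
-- ===== SOURCE A (Python) =====
-- from collections import Counter
--
-- def countOddLetters(n: int) -> int:
--     mappers = {
--         1: "one",
--         2: "two",
--         3: "three",
--         4: "four",
--         5: "five",
--         6: "six",
--         7: "seven",
--         8: "eight",
--         9: "nine",
--         0: "zero"
--     }
--     stack = []
--     while n > 0:
--         stack.append(mappers[n % 10])
--         n //= 10
--     s = "".join(stack)
--     counter = Counter(s)
--     return len([key for key in counter if counter[key] % 2 == 1])
-- ===== SOURCE B (Python) =====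
-- # Bitmask-parity re-implementation: bit i (= ord(letter) - 97) of _MASKS[d] is set
-- # iff that letter occurs an odd number of times in digit d's English word; XOR of
-- # these masks over the digits gives the parity of every letter's total count at once,
-- # so the answer is just the popcount of the combined mask -- no string, no Counter.
-- _MASKS = [33701904, 24592, 4734976, 655488, 1196064,
--           2097456, 8651008, 2367488, 524752, 272]
--
--
-- def countOddLetters(n: int) -> int:
--     def go(m: int) -> int:
--         return _MASKS[m % 10] ^ go(m // 10) if m > 0 else 0
--     return go(n).bit_count()
-- ===== Notes on version B (the rewrite author's own statement) =====
-- stated objective: alternative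
-- what changed: B never builds the concatenated string or a Counter: it stores each digit's odd-multiplicity letters as a precomputed letter bitmask, recursively XORs the masks of n's digits, and returns the popcount of the combined mask.
import Mathlib
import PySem

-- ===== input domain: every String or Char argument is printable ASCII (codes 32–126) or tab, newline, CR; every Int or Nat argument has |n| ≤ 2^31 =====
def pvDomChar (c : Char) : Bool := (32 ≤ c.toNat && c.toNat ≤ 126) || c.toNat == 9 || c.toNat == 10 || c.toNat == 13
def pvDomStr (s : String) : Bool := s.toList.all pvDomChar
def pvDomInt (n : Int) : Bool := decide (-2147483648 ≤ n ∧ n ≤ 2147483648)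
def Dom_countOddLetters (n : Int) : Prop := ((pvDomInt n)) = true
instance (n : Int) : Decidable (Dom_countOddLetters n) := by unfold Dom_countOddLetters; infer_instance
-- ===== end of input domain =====

-- B replaces A's build-the-whole-string-then-Counter pass by a recursion over the digits
-- that XORs precomputed per-digit odd-letter bitmasks and returns the popcount (alternative).

-- ===== PORT A =====
-- the Python dict 'mappers' as a function of its lookup key n % 10 (always 0–9; the
-- final else-branch is the remaining key 0)
def mappers (d : Int) : List Char :=
  if d = 1 then ['o','n','e']
  else if d = 2 then ['t','w','o']
  else if d = 3 then ['t','h','r','e','e']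
  else if d = 4 then ['f','o','u','r']
  else if d = 5 then ['f','i','v','e']
  else if d = 6 then ['s','i','x']
  else if d = 7 then ['s','e','v','e','n']
  else if d = 8 then ['e','i','g','h','t']
  else if d = 9 then ['n','i','n','e']
  else ['z','e','r','o']

-- the while-loop of A: push mappers[n % 10], n //= 10
def aLoop (n : Int) (stack : List (List Char)) : List (List Char) :=
  if _h : 0 < n then
    aLoop (PySem.Int.floordiv n 10) (stack ++ [mappers (PySem.Int.mod n 10)])
  else stack
termination_by n.toNat
decreasing_by
  rw [PySem.Int.floordiv_eq_ediv_of_pos (by omega)]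
  omega

def countOddLetters (n : Int) : Int :=
  let stack := aLoop n []
  let s := PySem.Chars.join [] stack
  let counter := PySem.Dict.counter s
  ((counter.keys).filter (fun key => PySem.Int.mod (counter.getD key 0) 2 == 1)).length

-- ===== PORT B =====
-- _MASKS: per digit, the bitmask (bit i = letter 'a'+i) of its word's odd-count letters
def masks : List Int :=
  [33701904, 24592, 4734976, 655488, 1196064, 2097456, 8651008, 2367488, 524752, 272]

-- go: _MASKS[m % 10] ^ go(m // 10) if m > 0 else 0
def bGo (m : Int) : Int :=
  if _h : 0 < m then
    PySem.Int.bxor (PySem.List.pyGetD masks (PySem.Int.mod m 10) 0) (bGo (PySem.Int.floordiv m 10))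
  else 0
termination_by m.toNat
decreasing_by
  rw [PySem.Int.floordiv_eq_ediv_of_pos (by omega)]
  omega

def countOddLetters_alt (n : Int) : Int :=
  ((PySem.Int.bitCount (bGo n) : Nat) : Int)

-- ===== PRECONDITION & SPEC =====
def Spec_countOddLetters (n : Int) (out : Int) : Prop := out = countOddLetters_alt n
instance (n : Int) (out : Int) : Decidable (Spec_countOddLetters n out) := by unfold Spec_countOddLetters; infer_instance

-- ===== CLAIM (what is proved, stated in full; the proofs are below) =====
def Claim_equal_countOddLetters : Prop := ∀ (n : Int), Dom_countOddLetters n → Spec_countOddLetters n (countOddLetters n)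

-- ===== LEMMAS AND PROOFS =====

-- letters with odd multiplicity in s, as a finite set
def odds (s : List Char) : Finset Char := s.toFinset.filter (fun c => s.count c % 2 = 1)

-- the letter with alphabet index i
def charOf (i : Nat) : Char := Char.ofNat (97 + i)

lemma mem_odds (s : List Char) (c : Char) : c ∈ odds s ↔ s.count c % 2 = 1 := by
  simp only [odds, Finset.mem_filter, List.mem_toFinset, and_iff_right_iff_imp]
  intro h
  exact List.count_pos_iff.mp (by omega)

lemma join_nil_eq_flatten (l : List (List Char)) : PySem.Chars.join [] l = l.flatten := by
  show List.intercalate [] l = l.flatten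
  induction l with
  | nil => rfl
  | cons x xs ih => cases xs <;> simp_all [List.intercalate, List.intersperse]

lemma length_filter_ofList (s : List Char) (p : Char → Bool) :
    (((PySem.Set.ofList s).filter p).length : Int) = ((s.toFinset.filter (fun c => p c = true)).card : Int) := by
  have hnd : ((PySem.Set.ofList s).filter p).Nodup := (PySem.Set.nodup_ofList s).filter p
  rw [← List.toFinset_card_of_nodup hnd]
  congr 2
  ext c
  simp [List.mem_toFinset, PySem.Set.mem_ofList]

-- A's loop builds its word list left-to-right: the initial stack is a prefix
lemma aLoop_append : ∀ (k : Nat) (n : Int), n.toNat = k →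
    ∀ stack, aLoop n stack = stack ++ aLoop n [] := by
  intro k
  induction k using Nat.strong_induction_on with
  | _ k ih =>
    intro n hk stack
    conv_lhs => rw [aLoop]
    conv_rhs => rw [aLoop]
    by_cases h : 0 < n
    · have hdec : (PySem.Int.floordiv n 10).toNat < k := by
        rw [PySem.Int.floordiv_eq_ediv_of_pos (by omega)]
        omega
      simp only [dif_pos h]
      rw [ih _ hdec _ rfl (stack ++ [mappers (PySem.Int.mod n 10)]),
          ih _ hdec _ rfl ([] ++ [mappers (PySem.Int.mod n 10)])]
      simp
    · simp [dif_neg h]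

-- every character in a digit word is a lowercase letter
lemma mappers_lower (d : Int) (c : Char) (hc : c ∈ mappers d) :
    97 ≤ c.toNat ∧ c.toNat < 123 := by
  unfold mappers at hc
  split_ifs at hc <;> (fin_cases hc <;> decide)

lemma flatten_lower : ∀ (k : Nat) (n : Int), n.toNat = k →
    ∀ c ∈ (aLoop n []).flatten, 97 ≤ c.toNat ∧ c.toNat < 123 := by
  intro k
  induction k using Nat.strong_induction_on with
  | _ k ih =>
    intro n hk c hc
    rw [aLoop] at hc
    by_cases h : 0 < n
    · have hdec : (PySem.Int.floordiv n 10).toNat < k := by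
        rw [PySem.Int.floordiv_eq_ediv_of_pos (by omega)]
        omega
      simp only [dif_pos h] at hc
      rw [aLoop_append _ _ rfl] at hc
      simp only [List.flatten_append, List.mem_append] at hc
      rcases hc with hc | hc
      · exact mappers_lower _ _ (by simpa using hc)
      · exact ih _ hdec _ rfl c hc
    · simp [dif_neg h] at hc

lemma parity_add (a b : Nat) :
    decide ((a + b) % 2 = 1) = xor (decide (a % 2 = 1)) (decide (b % 2 = 1)) := by
  by_cases ha : a % 2 = 1 <;> by_cases hb : b % 2 = 1 <;> simp [ha, hb] <;> omega

-- a mask matching a word's letter parities on bits 0–25 matches them everywhere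
lemma mask_one (md : Nat) (w : List Char) (hw : ∀ c ∈ w, 97 ≤ c.toNat ∧ c.toNat < 123)
    (hlt : md < 2 ^ 26)
    (hb : ∀ i, i < 26 → md.testBit i = decide (w.count (charOf i) % 2 = 1)) :
    ∀ i : Nat, md.testBit i = decide (w.count (charOf i) % 2 = 1) := by
  intro i
  by_cases hi : i < 26
  · exact hb i hi
  · have hz : w.count (charOf i) = 0 := by
      rw [List.count_eq_zero]
      intro hmem
      have hl := hw _ hmem
      have : (charOf i).toNat = 0 ∨ (charOf i).toNat = 97 + i := by
        unfold charOf Char.ofNat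
        split
        · right; rfl
        · left; rfl
      omega
    rw [Nat.testBit_lt_two_pow
      (lt_of_lt_of_le hlt (Nat.pow_le_pow_right (by norm_num) (by omega))), hz]
    decide

-- each digit's mask is exactly the parity bits of its word
lemma mask_spec (d : Int) (h0 : 0 ≤ d) (h1 : d < 10) :
    ∃ m : Nat, PySem.List.pyGetD masks d 0 = (m : Int) ∧ m < 2 ^ 26 ∧
      ∀ i : Nat, m.testBit i = decide ((mappers d).count (charOf i) % 2 = 1) := by
  interval_cases d
  · exact ⟨33701904, by decide, by decide, mask_one _ _ (mappers_lower 0) (by decide)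
      (fun i hi => by interval_cases i <;> decide)⟩
  · exact ⟨24592, by decide, by decide, mask_one _ _ (mappers_lower 1) (by decide)
      (fun i hi => by interval_cases i <;> decide)⟩
  · exact ⟨4734976, by decide, by decide, mask_one _ _ (mappers_lower 2) (by decide)
      (fun i hi => by interval_cases i <;> decide)⟩
  · exact ⟨655488, by decide, by decide, mask_one _ _ (mappers_lower 3) (by decide)
      (fun i hi => by interval_cases i <;> decide)⟩
  · exact ⟨1196064, by decide, by decide, mask_one _ _ (mappers_lower 4) (by decide)
      (fun i hi => by interval_cases i <;> decide)⟩
  · exact ⟨2097456, by decide, by decide, mask_one _ _ (mappers_lower 5) (by decide)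
      (fun i hi => by interval_cases i <;> decide)⟩
  · exact ⟨8651008, by decide, by decide, mask_one _ _ (mappers_lower 6) (by decide)
      (fun i hi => by interval_cases i <;> decide)⟩
  · exact ⟨2367488, by decide, by decide, mask_one _ _ (mappers_lower 7) (by decide)
      (fun i hi => by interval_cases i <;> decide)⟩
  · exact ⟨524752, by decide, by decide, mask_one _ _ (mappers_lower 8) (by decide)
      (fun i hi => by interval_cases i <;> decide)⟩
  · exact ⟨272, by decide, by decide, mask_one _ _ (mappers_lower 9) (by decide)
      (fun i hi => by interval_cases i <;> decide)⟩

-- B's XOR-fold computes the letter parities of A's concatenation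
lemma bGo_spec : ∀ (k : Nat) (n : Int), n.toNat = k →
    ∃ m : Nat, bGo n = (m : Int) ∧ m < 2 ^ 26 ∧
      ∀ i : Nat, m.testBit i = decide ((aLoop n []).flatten.count (charOf i) % 2 = 1) := by
  intro k
  induction k using Nat.strong_induction_on with
  | _ k ih =>
    intro n hk
    rw [bGo, aLoop]
    by_cases h : 0 < n
    · have hdec : (PySem.Int.floordiv n 10).toNat < k := by
        rw [PySem.Int.floordiv_eq_ediv_of_pos (by omega)]
        omega
      obtain ⟨md, hmd, hdlt, hdbit⟩ :=
        mask_spec _ (PySem.Int.mod_nonneg n (by omega)) (PySem.Int.mod_lt n (by omega))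
      obtain ⟨mr, hmr, hrlt, hrbit⟩ := ih _ hdec _ rfl
      refine ⟨md ^^^ mr, ?_, Nat.xor_lt_two_pow hdlt hrlt, fun i => ?_⟩
      · simp only [dif_pos h, hmd, hmr, PySem.Int.bxor_natCast]
      · rw [dif_pos h, aLoop_append _ _ rfl, List.flatten_append, List.count_append,
            parity_add, Nat.testBit_xor, hdbit, hrbit]
        simp
    · exact ⟨0, by simp [dif_neg h], by norm_num,
        fun i => by simp [dif_neg h, Nat.zero_testBit]⟩

-- Python's int.bit_count counts the set bits below any bound on the value
lemma bitCount_eq_countP : ∀ (k : Nat) (m : Nat), m < 2 ^ k →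
    PySem.Int.bitCount (m : Int) = (List.range k).countP m.testBit := by
  intro k
  induction k with
  | zero =>
    intro m hm
    interval_cases m
    simp [PySem.Int.bitCount_zero]
  | succ k ih =>
    intro m hm
    by_cases h0 : m = 0
    · subst h0
      simp only [Nat.cast_zero, PySem.Int.bitCount_zero]
      symm
      rw [List.countP_eq_zero]
      intro i _
      simp [Nat.zero_testBit]
    · rw [PySem.Int.bitCount_natCast (Nat.pos_of_ne_zero h0),
          ih (m / 2) (by omega), List.range_succ_eq_map,
          List.countP_cons, List.countP_map]
      have hcomp : (List.range k).countP (m.testBit ∘ Nat.succ)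
          = (List.range k).countP ((m / 2).testBit) :=
        List.countP_congr (fun i _ => by
          simp [Function.comp, ← Nat.testBit_add_one])
      rw [hcomp, Nat.testBit_zero]
      by_cases hp : m % 2 = 1 <;> simp [hp] <;> omega

-- the number of odd-count letters equals the number of set parity bits
lemma card_odds_eq_countP (s : List Char)
    (hl : ∀ c ∈ s, 97 ≤ c.toNat ∧ c.toNat < 123) :
    (odds s).card = (List.range 26).countP (fun i => decide (s.count (charOf i) % 2 = 1)) := by
  rw [List.countP_eq_length_filter, ← List.toFinset_card_of_nodup
    ((List.nodup_range).filter _)]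
  apply Finset.card_bij (fun c _ => c.toNat - 97)
  · intro c hc
    have hcs : c ∈ s := by
      rw [mem_odds] at hc
      exact List.count_pos_iff.mp (by omega)
    have hb := hl c hcs
    have hcEq : charOf (c.toNat - 97) = c := by
      unfold charOf
      rw [show 97 + (c.toNat - 97) = c.toNat by omega, Char.ofNat_toNat]
    simp only [List.mem_toFinset, List.mem_filter, List.mem_range]
    rw [mem_odds] at hc
    exact ⟨by omega, by rw [hcEq]; simpa using hc⟩
  · intro c1 h1 c2 h2 heq
    have b1 := hl c1 (List.count_pos_iff.mp (by have := (mem_odds s c1).mp h1; omega))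
    have b2 := hl c2 (List.count_pos_iff.mp (by have := (mem_odds s c2).mp h2; omega))
    have heq' : c1.toNat - 97 = c2.toNat - 97 := heq
    exact Char.ext (UInt32.toNat_inj.mp (show c1.toNat = c2.toNat by omega))
  · intro i hi
    simp only [List.mem_toFinset, List.mem_filter, List.mem_range] at hi
    refine ⟨charOf i, (mem_odds s _).mpr (by simpa using hi.2), ?_⟩
    have : (charOf i).toNat = 97 + i := by
      unfold charOf Char.ofNat
      split
      · rfl
      · rename_i hv
        exact absurd (show Nat.isValidChar (97 + i) from Or.inl (by omega)) hv
    omega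

-- ===== VERDICT (by name: the statement is the Claim_ definition above) =====
theorem countOddLetters_spec : Claim_equal_countOddLetters := by
  intro n _
  show countOddLetters n = countOddLetters_alt n
  unfold countOddLetters countOddLetters_alt
  simp only [PySem.Dict.keys_counter]
  set s := PySem.Chars.join [] (aLoop n []) with hs
  have hpred : ∀ c : Char,
      (PySem.Int.mod ((PySem.Dict.counter s).getD c 0) 2 == 1) = decide (s.count c % 2 = 1) := by
    intro c
    rw [PySem.Dict.getD_counter]
    rw [show (2 : Int) = ((2 : Nat) : Int) from rfl, PySem.Int.mod_natCast]
    by_cases h : s.count c % 2 = 1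
    · simp [h]
    · simp [h]
      omega
  rw [List.filter_congr (fun c _ => hpred c), length_filter_ofList]
  have hA : (s.toFinset.filter (fun c => (decide (s.count c % 2 = 1)) = true)) = odds s := by
    ext c
    simp [odds]
  obtain ⟨m, hm, hlt, hbit⟩ := bGo_spec n.toNat n rfl
  rw [hA, hm, bitCount_eq_countP 26 m hlt, hs, join_nil_eq_flatten,
      card_odds_eq_countP _ (flatten_lower n.toNat n rfl)]
  have hcnt : (List.range 26).countP
        (fun i => decide ((aLoop n []).flatten.count (charOf i) % 2 = 1))
      = (List.range 26).countP m.testBit :=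
    List.countP_congr (fun i _ => by rw [hbit i])
  rw [hcnt]
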